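-- pv_equiv track=rewrite | github.com/ZicsX/CP-Solutions | The_Attack_of_Knight.py | check
-- ===== SOURCE A (Python) =====
-- def isValid(x, y):
--     return x >= 1 and x <= 8 and y >= 1 and y <= 8
--
-- def check(x1, y1, x2, y2):
--     arr1 = [-1, 1, 2, 2, 1, -1, -2, -2]
--     arr2 = [-2, -2, -1, 1, 2, 2, 1, -1]
--     for i in range(8):
--         for j in range(8):
--             if isValid(x1 + arr1[i], y1 + arr2[i]) and isValid(
--                 x2 + arr1[j], y2 + arr2[j]
--             ):
--                 if x1 + arr1[i] == x2 + arr1[j] and y1 + arr2[i] == y2 + arr2[j]: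
--                     return True
--     return False
-- ===== SOURCE B (Python) =====
-- def isValid(x, y):
--     return x >= 1 and x <= 8 and y >= 1 and y <= 8
--
-- MOVES = [(-1, -2), (1, -2), (2, -1), (2, 1), (1, 2), (-1, 2), (-2, 1), (-2, -1)]
--
-- def reachable(x, y):
--     return {(x + dx, y + dy) for dx, dy in MOVES if isValid(x + dx, y + dy)}
--
-- def check(x1, y1, x2, y2):
--     return bool(reachable(x1, y1) & reachable(x2, y2))
-- ===== Notes on version B (the rewrite author's own statement) =====
-- stated objective: simpler
-- what changed: Replaces A's nested 64-iteration loop comparing every pair of knight moves with two single passes that build the sets of valid reachable squares and a set-intersection emptiness test.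
import Mathlib
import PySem

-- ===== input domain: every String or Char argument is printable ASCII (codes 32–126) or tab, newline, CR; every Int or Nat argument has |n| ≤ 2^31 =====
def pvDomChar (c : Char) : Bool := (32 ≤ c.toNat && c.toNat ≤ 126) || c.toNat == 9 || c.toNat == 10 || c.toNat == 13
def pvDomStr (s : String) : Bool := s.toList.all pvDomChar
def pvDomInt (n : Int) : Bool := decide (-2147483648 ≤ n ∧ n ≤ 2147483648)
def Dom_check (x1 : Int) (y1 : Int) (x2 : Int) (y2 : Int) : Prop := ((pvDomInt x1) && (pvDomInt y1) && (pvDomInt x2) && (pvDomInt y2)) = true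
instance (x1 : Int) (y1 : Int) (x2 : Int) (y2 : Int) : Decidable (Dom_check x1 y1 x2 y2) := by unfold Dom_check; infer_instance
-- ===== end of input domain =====

-- B replaces A's 64-iteration nested pairwise move comparison by building the two sets of
-- valid reachable squares and testing their intersection (objective: simpler).

-- ===== PORT A =====
def isValid (x : Int) (y : Int) : Bool :=
  decide (x ≥ 1) && decide (x ≤ 8) && decide (y ≥ 1) && decide (y ≤ 8)

-- literal port of A's nested 'for i in range(8): for j in range(8):' with early return (= List.any)
def check (x1 : Int) (y1 : Int) (x2 : Int) (y2 : Int) : Bool :=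
  let arr1 : List Int := [-1, 1, 2, 2, 1, -1, -2, -2]
  let arr2 : List Int := [-2, -2, -1, 1, 2, 2, 1, -1]
  (PySem.List.pyRange 0 8 1).any fun i =>
    (PySem.List.pyRange 0 8 1).any fun j =>
      (isValid (x1 + PySem.List.pyGetD arr1 i 0) (y1 + PySem.List.pyGetD arr2 i 0) &&
       isValid (x2 + PySem.List.pyGetD arr1 j 0) (y2 + PySem.List.pyGetD arr2 j 0)) &&
      (decide (x1 + PySem.List.pyGetD arr1 i 0 = x2 + PySem.List.pyGetD arr1 j 0) &&
       decide (y1 + PySem.List.pyGetD arr2 i 0 = y2 + PySem.List.pyGetD arr2 j 0))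

-- ===== PORT B =====
def bMoves : List (Int × Int) :=
  [(-1, -2), (1, -2), (2, -1), (2, 1), (1, 2), (-1, 2), (-2, 1), (-2, -1)]

-- the set comprehension {(x+dx, y+dy) for dx,dy in MOVES if isValid(x+dx, y+dy)}
def reachable (x : Int) (y : Int) : PySem.Set (Int × Int) :=
  PySem.Set.ofList ((bMoves.filter fun m => isValid (x + m.1) (y + m.2)).map
    fun m => (x + m.1, y + m.2))

-- bool(s1 & s2)
def check_alt (x1 : Int) (y1 : Int) (x2 : Int) (y2 : Int) : Bool :=
  !(PySem.Set.inter (reachable x1 y1) (reachable x2 y2)).isEmpty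

-- ===== PRECONDITION & SPEC =====
def Spec_check (x1 : Int) (y1 : Int) (x2 : Int) (y2 : Int) (out : Bool) : Prop := out = check_alt x1 y1 x2 y2
instance (x1 : Int) (y1 : Int) (x2 : Int) (y2 : Int) (out : Bool) : Decidable (Spec_check x1 y1 x2 y2 out) := by unfold Spec_check; infer_instance

-- ===== CLAIM (what is proved, stated in full; the proofs are below) =====
def Claim_equal_check : Prop := ∀ (x1 : Int) (y1 : Int) (x2 : Int) (y2 : Int), Dom_check x1 y1 x2 y2 → Spec_check x1 y1 x2 y2 (check x1 y1 x2 y2)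

-- ===== LEMMAS AND PROOFS =====

lemma moves_of_range : ∀ i ∈ PySem.List.pyRange 0 8 1,
    (PySem.List.pyGetD [-1, 1, 2, 2, 1, -1, -2, -2] i 0, PySem.List.pyGetD [-2, -2, -1, 1, 2, 2, 1, -1] i 0) ∈ bMoves := by decide

lemma range_of_move : ∀ m ∈ bMoves, ∃ i ∈ PySem.List.pyRange 0 8 1,
    PySem.List.pyGetD [-1, 1, 2, 2, 1, -1, -2, -2] i 0 = m.1 ∧ PySem.List.pyGetD [-2, -2, -1, 1, 2, 2, 1, -1] i 0 = m.2 := by decide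

lemma mem_reachable (x y : Int) (p : Int × Int) :
    p ∈ reachable x y ↔ ∃ m ∈ bMoves, isValid (x + m.1) (y + m.2) = true ∧ p = (x + m.1, y + m.2) := by
  constructor
  · intro h
    rw [reachable, PySem.Set.mem_ofList] at h
    obtain ⟨m, hm, hp⟩ := List.mem_map.mp h
    exact ⟨m, (List.mem_filter.mp hm).1, (List.mem_filter.mp hm).2, hp.symm⟩
  · rintro ⟨m, hm, hv, hp⟩
    rw [reachable, PySem.Set.mem_ofList]
    exact List.mem_map.mpr ⟨m, List.mem_filter.mpr ⟨hm, hv⟩, hp.symm⟩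

lemma check_iff (x1 y1 x2 y2 : Int) :
    check x1 y1 x2 y2 = true ↔ ∃ p, p ∈ reachable x1 y1 ∧ p ∈ reachable x2 y2 := by
  simp only [check, List.any_eq_true]
  constructor
  · rintro ⟨i, hi, j, hj, hc⟩
    simp only [Bool.and_eq_true, decide_eq_true_eq] at hc
    obtain ⟨⟨hv1, hv2⟩, hx, hy⟩ := hc
    refine ⟨(x1 + PySem.List.pyGetD [-1, 1, 2, 2, 1, -1, -2, -2] i 0, y1 + PySem.List.pyGetD [-2, -2, -1, 1, 2, 2, 1, -1] i 0), ?_, ?_⟩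
    · rw [mem_reachable]
      exact ⟨_, moves_of_range i hi, hv1, rfl⟩
    · rw [mem_reachable]
      exact ⟨_, moves_of_range j hj, hv2, by simp only [Prod.mk.injEq]; exact ⟨hx, hy⟩⟩
  · rintro ⟨p, hp1, hp2⟩
    rw [mem_reachable] at hp1 hp2
    obtain ⟨m, hm, hv1, hpm⟩ := hp1
    obtain ⟨m', hm', hv2, hpm'⟩ := hp2
    obtain ⟨i, hi, hi1, hi2⟩ := range_of_move m hm
    obtain ⟨j, hj, hj1, hj2⟩ := range_of_move m' hm'
    refine ⟨i, hi, j, hj, ?_⟩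
    have he : (x1 + m.1, y1 + m.2) = (x2 + m'.1, y2 + m'.2) := hpm ▸ hpm'
    simp only [Prod.mk.injEq] at he
    simp only [Bool.and_eq_true, decide_eq_true_eq, hi1, hi2, hj1, hj2]
    exact ⟨⟨hv1, hv2⟩, he.1, he.2⟩

lemma check_alt_iff (x1 y1 x2 y2 : Int) :
    check_alt x1 y1 x2 y2 = true ↔ ∃ p, p ∈ reachable x1 y1 ∧ p ∈ reachable x2 y2 := by
  simp only [check_alt, Bool.not_eq_true', List.isEmpty_eq_false_iff_exists_mem]
  constructor
  · rintro ⟨p, hp⟩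
    rw [PySem.Set.mem_inter] at hp
    exact ⟨p, hp⟩
  · rintro ⟨p, h1, h2⟩
    exact ⟨p, (PySem.Set.mem_inter _ _ _).mpr ⟨h1, h2⟩⟩

-- ===== VERDICT (by name: the statement is the Claim_ definition above) =====
theorem check_spec : Claim_equal_check := by
  intro x1 y1 x2 y2 _
  show check x1 y1 x2 y2 = check_alt x1 y1 x2 y2
  rw [Bool.eq_iff_iff, check_iff, check_alt_iff]
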